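-- pv_equiv track=rewrite | github.com/fedepicado/Comparacion-masiva-ADNmt | adnmt_logic.py | _es_diferencia
-- ===== SOURCE A (Python) =====
-- from typing import Iterable, List, Sequence, Tuple, Optional
--
-- def _es_diferencia(grupos_letras: Sequence[Sequence[str]]) -> bool:
--     """Devuelve True si NO hay letras repetidas en el aplanado; False si hay intersección.
--
--     Interpretación basada en el notebook: si hay repetidos -> no diferencia (comparten base);
--     si no los hay -> diferencia.
--     """
--     aplanado: List[str] = []
--     for grupo in grupos_letras:
--         aplanado += list(grupo)
--     vistos: set = set()
--     repetidos: set = set()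
--     for ch in aplanado:
--         if ch in vistos:
--             repetidos.add(ch)
--         vistos.add(ch)
--     return len(repetidos) == 0
-- ===== SOURCE B (Python) =====
-- def _es_diferencia(grupos_letras):
--     """True iff the flattened letter groups contain no duplicate: sort then scan adjacent."""
--     flat = sorted(ch for grupo in grupos_letras for ch in grupo)
--     for prev, cur in zip(flat, flat[1:]):
--         if prev == cur:
--             return False
--     return True
-- ===== Notes on version B (the rewrite author's own statement) =====
-- stated objective: alternative
-- what changed: Replaces A's two-pass seen/repeated hash-set accumulation with flatten, sort, and a single adjacent-equality scan with early exit.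
import Mathlib
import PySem

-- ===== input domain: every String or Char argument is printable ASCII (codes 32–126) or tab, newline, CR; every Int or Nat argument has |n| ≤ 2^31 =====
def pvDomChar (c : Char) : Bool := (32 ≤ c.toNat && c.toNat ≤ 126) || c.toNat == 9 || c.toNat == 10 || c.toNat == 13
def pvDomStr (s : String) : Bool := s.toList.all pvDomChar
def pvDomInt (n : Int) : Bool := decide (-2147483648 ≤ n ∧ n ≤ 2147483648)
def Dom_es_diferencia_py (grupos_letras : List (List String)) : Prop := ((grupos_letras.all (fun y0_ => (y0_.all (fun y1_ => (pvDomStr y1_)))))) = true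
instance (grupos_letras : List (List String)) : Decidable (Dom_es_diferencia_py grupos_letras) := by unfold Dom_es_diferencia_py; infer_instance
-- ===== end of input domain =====

-- B replaces A's seen/repeated set accumulation with sort-then-adjacent-scan; alternative decomposition, same result.

-- ===== PORT A =====
def es_diferencia_py (grupos_letras : List (List String)) : Bool :=
  let aplanado : List String := grupos_letras.foldl (fun acc grupo => acc ++ grupo) []
  let st : PySem.Set String × PySem.Set String :=
    aplanado.foldl
      (fun (p : PySem.Set String × PySem.Set String) ch =>
        let repetidos := if PySem.Set.contains p.1 ch then PySem.Set.add p.2 ch else p.2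
        (PySem.Set.add p.1 ch, repetidos))
      (PySem.Set.empty, PySem.Set.empty)
  PySem.Set.len st.2 == 0

-- ===== PORT B =====
-- helper: scan the sorted list, False on any equal adjacent pair
def pvAdjScan : List String → Bool
  | [] => true
  | [_] => true
  | a :: b :: t => if a == b then false else pvAdjScan (b :: t)

def es_diferencia_py_alt (grupos_letras : List (List String)) : Bool :=
  pvAdjScan (PySem.List.sorted (grupos_letras.flatMap (fun grupo => grupo)) (fun x => x) false)

-- ===== PRECONDITION & SPEC =====
def Spec_es_diferencia_py (grupos_letras : List (List String)) (out : Bool) : Prop := out = es_diferencia_py_alt grupos_letras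
instance (grupos_letras : List (List String)) (out : Bool) : Decidable (Spec_es_diferencia_py grupos_letras out) := by unfold Spec_es_diferencia_py; infer_instance

-- ===== CLAIM (what is proved, stated in full; the proofs are below) =====
def Claim_equal_es_diferencia_py : Prop := ∀ (grupos_letras : List (List String)), Dom_es_diferencia_py grupos_letras → Spec_es_diferencia_py grupos_letras (es_diferencia_py grupos_letras)

-- ===== LEMMAS AND PROOFS =====

-- A's duplicate-collecting fold leaves `repetidos` empty iff nothing processed was a repeat
theorem pv_fold_repetidos_empty (xs : List String) :
    ∀ (v r : PySem.Set String),
      ((xs.foldl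
        (fun (p : PySem.Set String × PySem.Set String) ch =>
          let repetidos := if PySem.Set.contains p.1 ch then PySem.Set.add p.2 ch else p.2
          (PySem.Set.add p.1 ch, repetidos)) (v, r)).2 = []
        ↔ (r = [] ∧ xs.Nodup ∧ ∀ x ∈ xs, ¬ x ∈ v)) := by
  induction xs with
  | nil => intro v r; simp
  | cons a t ih =>
    intro v r
    simp only [List.foldl_cons]
    rw [ih]
    have hadd : ∀ (s : PySem.Set String) (x : String), PySem.Set.add s x ≠ [] := by
      intro s x
      simp only [PySem.Set.add]
      split_ifs with h
      · intro hs; subst hs; simp [PySem.Set.contains] at h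
      · simp
    constructor
    · rintro ⟨hr, ht, hv⟩
      by_cases hc : PySem.Set.contains v a
      · simp only [hc, if_true] at hr; exact absurd hr (hadd _ _)
      · simp only [hc] at hr
        have hca : ¬ a ∈ v := by
          intro hm; simp [PySem.Set.contains, List.contains_eq_mem, hm] at hc
        refine ⟨by simpa using hr, ?_, ?_⟩
        · refine List.nodup_cons.mpr ⟨?_, ht⟩
          intro hat
          exact (hv a hat) (by simp [PySem.Set.mem_add])
        · intro x hx
          rcases List.mem_cons.mp hx with hx | hx
          · exact hx ▸ hca
          · intro hxv
            exact (hv x hx) (by simp [PySem.Set.mem_add, hxv])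
    · rintro ⟨hr, hnd, hv⟩
      rcases List.nodup_cons.mp hnd with ⟨hat, htnd⟩
      have hca : ¬ a ∈ v := hv a (by simp)
      refine ⟨by rw [if_neg (by simpa using hca)]; exact hr, htnd, ?_⟩
      intro x hx hxav
      rw [PySem.Set.mem_add] at hxav
      rcases hxav with hxv | hxa
      · exact hv x (List.mem_cons_of_mem a hx) hxv
      · exact hat (hxa ▸ hx)

-- A returns true iff the flattened list has no duplicates
theorem pv_A_true_iff (gs : List (List String)) :
    es_diferencia_py gs = true ↔ (gs.flatMap (fun g => g)).Nodup := by
  unfold es_diferencia_py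
  rw [PySem.List.foldl_append_eq_flatMap]
  simp only [List.nil_append]
  rw [show ∀ (s : PySem.Set String), (PySem.Set.len s == 0) = true ↔ s = [] by
    intro s; cases s <;> simp [PySem.Set.len] <;> omega]
  rw [pv_fold_repetidos_empty]
  simp [PySem.Set.empty]

-- on a ≤-sorted list, the adjacent scan decides Nodup
theorem pv_adjScan_nodup (l : List String) (hp : l.Pairwise (· ≤ ·)) :
    (pvAdjScan l = true ↔ l.Nodup) := by
  induction l with
  | nil => simp [pvAdjScan]
  | cons a t ih =>
    cases t with
    | nil => simp [pvAdjScan]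
    | cons b s =>
      rcases List.pairwise_cons.mp hp with ⟨ha, hpt⟩
      by_cases hab : a = b
      · subst hab
        simp [pvAdjScan]
      · have hstep : pvAdjScan (a :: b :: s) = pvAdjScan (b :: s) := by
          simp [pvAdjScan, hab]
        rw [hstep, ih hpt]
        constructor
        · intro hnd
          refine List.nodup_cons.mpr ⟨?_, hnd⟩
          intro hmem
          rcases List.mem_cons.mp hmem with h | h
          · exact hab h
          · -- a ∈ s : a ≤ b (sorted) and b ≤ a (sorted tail) force a = b
            have hba : b ≤ a := (List.pairwise_cons.mp hpt).1 a h
            have hab' : a ≤ b := ha b (List.mem_cons_self)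
            exact hab (le_antisymm hab' hba)
        · intro hnd; exact (List.nodup_cons.mp hnd).2

-- B also returns true iff the flattened list has no duplicates
theorem pv_B_true_iff (gs : List (List String)) :
    es_diferencia_py_alt gs = true ↔ (gs.flatMap (fun g => g)).Nodup := by
  unfold es_diferencia_py_alt
  have hperm : (PySem.List.sorted (gs.flatMap (fun g => g)) (fun x => x) false).Perm
      (gs.flatMap (fun g => g)) := PySem.List.sorted_perm _ _ _
  have hp : (PySem.List.sorted (gs.flatMap (fun g => g)) (fun x => x) false).Pairwise
      (· ≤ ·) := PySem.List.sorted_pairwise _ _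
  rw [pv_adjScan_nodup _ hp, hperm.nodup_iff]

-- ===== VERDICT (by name: the statement is the Claim_ definition above) =====
theorem es_diferencia_py_spec : Claim_equal_es_diferencia_py := by
  intro gs _hdom
  unfold Spec_es_diferencia_py
  rw [Bool.eq_iff_iff, pv_A_true_iff, pv_B_true_iff]
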